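-- pv_equiv track=rewrite | github.com/joho54/jungle-backjoon | 백준/Silver/25192. 인사성 밝은 곰곰이/인사성 밝은 곰곰이.py | solve
-- ===== SOURCE A (Python) =====
-- def solve(log: list):
--     s = set()
--     ans = 0
--     for elem in log:
--         if elem == 'ENTER':
--             ans += len(s)
--             s.clear()
--         else:
--             s.add(elem)
--     ans += len(s)
--     return ans
-- ===== SOURCE B (Python) =====
-- def solve(log: list):
--     # Tag positions with a session id (number of ENTERs seen so far) and count a
--     # greeting exactly when a name is seen for the first time within its session,
--     # using one persistent last-session dict instead of a set cleared per session.
--     last = {}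
--     sid = 0
--     ans = 0
--     for elem in log:
--         if elem == 'ENTER':
--             sid += 1
--         elif last.get(elem) != sid:
--             last[elem] = sid
--             ans += 1
--     return ans
-- ===== Notes on version B (the rewrite author's own statement) =====
-- stated objective: alternative
-- what changed: A maintains a per-session set flushed and size-summed on every ENTER; B never clears anything: it numbers sessions with a running ENTER counter and keeps one persistent dict name->last session id, incrementing the answer exactly when a name's stored session id differs from the current one.
import Mathlib
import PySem

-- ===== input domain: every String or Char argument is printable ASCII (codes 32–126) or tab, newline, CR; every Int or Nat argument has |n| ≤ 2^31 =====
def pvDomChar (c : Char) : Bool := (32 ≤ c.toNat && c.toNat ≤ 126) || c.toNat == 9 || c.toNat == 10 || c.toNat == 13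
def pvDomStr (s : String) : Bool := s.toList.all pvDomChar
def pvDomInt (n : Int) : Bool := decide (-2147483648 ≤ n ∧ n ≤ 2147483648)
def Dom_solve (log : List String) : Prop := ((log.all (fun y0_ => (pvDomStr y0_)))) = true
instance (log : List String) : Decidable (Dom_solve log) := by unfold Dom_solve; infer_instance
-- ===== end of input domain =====

-- B replaces A's per-session set (flushed and size-summed on each ENTER) by a running
-- session counter and one persistent dict name -> last session id, counting a greeting
-- the moment a name first appears in its session (alternative decomposition, same cost).

-- ===== PORT A =====
-- the for-loop over (s, ans): on 'ENTER' add len(s) and clear, else s.add(elem)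
def solveLoop (s : PySem.Set String) (ans : Int) : List String → Int
  | [] => ans + PySem.Set.len s
  | elem :: rest =>
    if elem = "ENTER" then solveLoop PySem.Set.empty (ans + PySem.Set.len s) rest
    else solveLoop (PySem.Set.add s elem) ans rest

def solve (log : List String) : Int := solveLoop PySem.Set.empty 0 log

-- ===== PORT B =====
-- the for-loop over (last, sid, ans): on 'ENTER' sid += 1; elif last.get(elem) != sid
-- then last[elem] = sid; ans += 1
def solveAltLoop (last : PySem.Dict String Int) (sid ans : Int) : List String → Int
  | [] => ans
  | elem :: rest =>
    if elem = "ENTER" then solveAltLoop last (sid + 1) ans rest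
    else if PySem.Dict.get? last elem ≠ some sid then
      solveAltLoop (PySem.Dict.insert last elem sid) sid (ans + 1) rest
    else solveAltLoop last sid ans rest

def solve_alt (log : List String) : Int := solveAltLoop PySem.Dict.empty 0 0 log

-- ===== PRECONDITION & SPEC =====
def Spec_solve (log : List String) (out : Int) : Prop := out = solve_alt log
instance (log : List String) (out : Int) : Decidable (Spec_solve log out) := by
  unfold Spec_solve; infer_instance

-- ===== CLAIM =====
def Claim_equal_solve : Prop := ∀ (log : List String), Dom_solve log → Spec_solve log (solve log)

-- ===== LEMMAS AND PROOFS =====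

-- Invariant: A's set holds exactly the names whose stored session id is the current one,
-- all stored ids are ≤ the current one, and B's answer runs ahead of A's by len(s).
theorem solveLoop_eq_alt (log : List String) :
    ∀ (s : PySem.Set String) (last : PySem.Dict String Int) (sid ans : Int),
      (∀ e, e ∈ s ↔ PySem.Dict.get? last e = some sid) →
      (∀ e v, PySem.Dict.get? last e = some v → v ≤ sid) →
      solveLoop s ans log = solveAltLoop last sid (ans + PySem.Set.len s) log := by
  induction log with
  | nil => intro s last sid ans _ _; simp [solveLoop, solveAltLoop]
  | cons elem rest ih =>
    intro s last sid ans hmem hle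
    by_cases he : elem = "ENTER"
    · rw [solveLoop, if_pos he, solveAltLoop, if_pos he]
      have h0 : (PySem.Set.empty : PySem.Set String) = [] := rfl
      rw [ih PySem.Set.empty last (sid + 1) (ans + PySem.Set.len s)
        (by intro e
            constructor
            · intro h; rw [h0] at h; simp at h
            · intro h; exact absurd (hle e _ h) (by omega))
        (by intro e v h; exact le_trans (hle e v h) (by omega))]
      simp [PySem.Set.len]
    · rw [solveLoop, if_neg he, solveAltLoop, if_neg he]
      by_cases hc : PySem.Dict.get? last elem = some sid
      · -- elem already counted this session: both sides unchanged
        have hmem' : elem ∈ s := (hmem elem).mpr hc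
        rw [if_neg (by simpa using hc), PySem.Set.add_of_mem hmem']
        exact ih s last sid ans hmem hle
      · -- a new greeting in this session
        have hnot : elem ∉ s := fun h => hc ((hmem elem).mp h)
        rw [if_pos (by simpa using hc), PySem.Set.add_of_not_mem hnot]
        rw [ih (s ++ [elem]) (PySem.Dict.insert last elem sid) sid ans
          (by intro e
              rw [PySem.Dict.get?_insert]
              by_cases hee : e = elem <;> simp [hee, hmem e])
          (by intro e v h
              rw [PySem.Dict.get?_insert] at h
              by_cases hee : e = elem
              · simp [hee] at h; omega
              · exact hle e v (by simpa [hee] using h))]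
        simp [PySem.Set.len]
        ring_nf

-- ===== VERDICT =====
theorem solve_spec : Claim_equal_solve := by
  intro log _
  unfold Spec_solve solve solve_alt
  rw [solveLoop_eq_alt log PySem.Set.empty PySem.Dict.empty 0 0
    (by intro e; simp [PySem.Set.empty, PySem.Dict.get?, PySem.Dict.empty])
    (by intro e v h; simp [PySem.Dict.get?, PySem.Dict.empty] at h)]
  simp [PySem.Set.empty, PySem.Set.len]
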